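-- pv_equiv track=rewrite | github.com/Fejjii/Interview-App | src/interview_app/app/interview_form_config.py | build_focus_options
-- ===== SOURCE A (Python) =====
-- SYSTEM_DESIGN_FOCUS_RELEVANT: frozenset[str] = frozenset(
--     {
--         "Software Engineering",
--         "Data Engineering",
--         "Data Analysis",
--         "AI / Machine Learning",
--         "Cloud / DevOps",
--         "Cybersecurity",
--     }
-- )
--
-- INTERVIEW_FOCUS_OPTIONS: tuple[str, ...] = (
--     "Behavioral / Soft Skills",
--     "Technical Knowledge",
--     "Coding / Practical Exercise",
--     "System Design / Architecture",
--     "Leadership / Management",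
--     "Culture Fit / Values",
--     "CV / Experience Deep Dive",
--     "Business Case / Strategy",
--     "Stakeholder Management",
--     "Salary / Negotiation Preparation",
-- )
--
-- def include_system_design_focus(role_category: str) -> bool:
--     """Whether to offer System Design / Architecture in the focus list."""
--     return role_category in SYSTEM_DESIGN_FOCUS_RELEVANT
--
-- def build_focus_options(
--     role_category: str,
--     seniority: str,
-- ) -> list[str]:
--     """
--     Build ordered focus options: deprioritize system design for non-relevant
--     categories; prioritize leadership and stakeholder topics for senior leaders.
--     """
--     opts = list(INTERVIEW_FOCUS_OPTIONS)
--     if not include_system_design_focus(role_category):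
--         opts = [o for o in opts if o != "System Design / Architecture"]
--
--     leadership_first = {"Manager", "Director"}
--     if seniority in leadership_first:
--         priority = [
--             "Leadership / Management",
--             "Stakeholder Management",
--             "Behavioral / Soft Skills",
--             "Culture Fit / Values",
--             "CV / Experience Deep Dive",
--         ]
--         rest = [o for o in opts if o not in priority]
--         opts = [o for o in priority if o in opts] + rest
--
--     return opts
-- ===== SOURCE B (Python) =====
-- SYSTEM_DESIGN_FOCUS_RELEVANT = frozenset(
--     {
--         "Software Engineering",
--         "Data Engineering",
--         "Data Analysis",
--         "AI / Machine Learning",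
--         "Cloud / DevOps",
--         "Cybersecurity",
--     }
-- )
--
-- INTERVIEW_FOCUS_OPTIONS = (
--     "Behavioral / Soft Skills",
--     "Technical Knowledge",
--     "Coding / Practical Exercise",
--     "System Design / Architecture",
--     "Leadership / Management",
--     "Culture Fit / Values",
--     "CV / Experience Deep Dive",
--     "Business Case / Strategy",
--     "Stakeholder Management",
--     "Salary / Negotiation Preparation",
-- )
--
-- PRIORITY = [
--     "Leadership / Management",
--     "Stakeholder Management",
--     "Behavioral / Soft Skills",
--     "Culture Fit / Values",
--     "CV / Experience Deep Dive",
-- ]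
--
--
-- def build_focus_options(role_category, seniority):
--     keep_sd = role_category in SYSTEM_DESIGN_FOCUS_RELEVANT
--     opts = [o for o in INTERVIEW_FOCUS_OPTIONS
--             if keep_sd or o != "System Design / Architecture"]
--     if seniority in ("Manager", "Director"):
--         rank = {label: i for i, label in enumerate(PRIORITY)}
--         opts = sorted(opts, key=lambda o: rank.get(o, len(PRIORITY)))
--     return opts
-- ===== Notes on version B (the rewrite author's own statement) =====
-- stated objective: alternative
-- what changed: The Manager/Director branch's partition into priority-then-rest is replaced by one stable sort of the option list keyed by a rank dict over the five priority labels (non-priority labels share the largest key).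
import Mathlib
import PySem

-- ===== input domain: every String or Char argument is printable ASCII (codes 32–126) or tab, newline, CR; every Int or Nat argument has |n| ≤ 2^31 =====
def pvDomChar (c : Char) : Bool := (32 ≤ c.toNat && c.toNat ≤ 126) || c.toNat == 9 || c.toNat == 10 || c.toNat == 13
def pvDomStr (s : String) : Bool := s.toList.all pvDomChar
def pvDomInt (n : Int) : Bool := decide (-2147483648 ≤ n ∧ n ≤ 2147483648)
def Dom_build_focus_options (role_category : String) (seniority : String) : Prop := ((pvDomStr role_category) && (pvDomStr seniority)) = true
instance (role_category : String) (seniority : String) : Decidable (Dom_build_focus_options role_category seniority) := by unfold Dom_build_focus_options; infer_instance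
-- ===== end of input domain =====

-- B replaces A's partition-and-reassemble leadership branch by a stable sort keyed by a
-- rank dictionary over the five priority labels (objective: alternative decomposition).

-- ===== PORT A =====
def SYSTEM_DESIGN_FOCUS_RELEVANT : PySem.Set String := PySem.Set.ofList
  ["Software Engineering", "Data Engineering", "Data Analysis",
   "AI / Machine Learning", "Cloud / DevOps", "Cybersecurity"]

def INTERVIEW_FOCUS_OPTIONS : List String :=
  ["Behavioral / Soft Skills", "Technical Knowledge", "Coding / Practical Exercise",
   "System Design / Architecture", "Leadership / Management", "Culture Fit / Values",
   "CV / Experience Deep Dive", "Business Case / Strategy", "Stakeholder Management",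
   "Salary / Negotiation Preparation"]

def include_system_design_focus (role_category : String) : Bool :=
  role_category ∈ SYSTEM_DESIGN_FOCUS_RELEVANT

def build_focus_options (role_category : String) (seniority : String) : List String :=
  let opts := INTERVIEW_FOCUS_OPTIONS
  let opts :=
    if include_system_design_focus role_category then opts
    else opts.filter (fun o => o ≠ "System Design / Architecture")
  let leadership_first : PySem.Set String := PySem.Set.ofList ["Manager", "Director"]
  if seniority ∈ leadership_first then
    let priority : List String :=
      ["Leadership / Management", "Stakeholder Management", "Behavioral / Soft Skills",
       "Culture Fit / Values", "CV / Experience Deep Dive"]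
    let rest := opts.filter (fun o => o ∉ priority)
    (priority.filter (fun o => o ∈ opts)) ++ rest
  else opts

-- ===== PORT B =====
def PRIORITY : List String :=
  ["Leadership / Management", "Stakeholder Management", "Behavioral / Soft Skills",
   "Culture Fit / Values", "CV / Experience Deep Dive"]

def build_focus_options_alt (role_category : String) (seniority : String) : List String :=
  let keep_sd := include_system_design_focus role_category
  let opts := INTERVIEW_FOCUS_OPTIONS.filter
    (fun o => keep_sd || o ≠ "System Design / Architecture")
  if seniority ∈ (["Manager", "Director"] : List String) then
    let rank : PySem.Dict String Int :=
      (PySem.List.enumerate PRIORITY).foldl (fun d p => d.insert p.2 p.1) PySem.Dict.empty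
    PySem.List.sorted opts (fun o => rank.getD o (PRIORITY.length : Int))
  else opts

-- ===== PRECONDITION & SPEC =====
def Spec_build_focus_options (role_category : String) (seniority : String) (out : List String) : Prop := out = build_focus_options_alt role_category seniority
instance (role_category : String) (seniority : String) (out : List String) : Decidable (Spec_build_focus_options role_category seniority out) := by unfold Spec_build_focus_options; infer_instance

-- ===== CLAIM (what is proved, stated in full; the proofs are below) =====
def Claim_equal_build_focus_options : Prop := ∀ (role_category : String) (seniority : String), Dom_build_focus_options role_category seniority → Spec_build_focus_options role_category seniority (build_focus_options role_category seniority)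

-- ===== LEMMAS AND PROOFS =====

-- Both results depend on the input strings only through the two booleans
-- 'include_system_design_focus role_category' and 'seniority ∈ {Manager, Director}';
-- fixing them leaves closed computations that 'decide' evaluates.
theorem build_focus_options_cases (role_category seniority : String) :
    build_focus_options role_category seniority = build_focus_options_alt role_category seniority := by
  have hmem : (seniority ∈ PySem.Set.ofList ["Manager", "Director"]) ↔
      (seniority ∈ (["Manager", "Director"] : List String)) := by
    simp [PySem.Set.mem_ofList]
  unfold build_focus_options build_focus_options_alt
  by_cases hr : include_system_design_focus role_category = true <;>
    by_cases hs : seniority ∈ (["Manager", "Director"] : List String) <;>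
      simp only [hr, Bool.not_eq_true] at * <;>
        simp [hmem, hs] <;> decide

-- ===== VERDICT (by name: the statement is the Claim_ definition above) =====
theorem build_focus_options_spec : Claim_equal_build_focus_options := by
  intro r s _
  unfold Spec_build_focus_options
  exact build_focus_options_cases r s
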